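-- pv_equiv track=rewrite | github.com/lyonthezhang/337-proj3 | vegetarian.py | dish_has_meat
-- ===== SOURCE A (Python) =====
-- def dish_has_meat(ingredients):
--     meat_lst = ['hamburger', 'cheeseburger', 'corned beef', 'sloppy joe', 'chicken', \
--                 'steak', 'beef', 'lamb', 'bacon', 'pork', 'duck', 'bison', 'rabbit', \
--                 'cow', 'sausage', 'turkey', 'salmon', 'cod', 'fish', 'halibut',\
--                 'shellfish', 'crab', 'lobster', 'shrimp', 'prawn', 'scallop']
--
--     for i in ingredients:
--         words = i.lower().split()
--         if any(word in words for word in meat_lst):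
--             return True
--
--     return False
-- ===== SOURCE B (Python) =====
-- _MEAT = frozenset(['hamburger', 'cheeseburger', 'corned beef', 'sloppy joe', 'chicken',
--                    'steak', 'beef', 'lamb', 'bacon', 'pork', 'duck', 'bison', 'rabbit',
--                    'cow', 'sausage', 'turkey', 'salmon', 'cod', 'fish', 'halibut',
--                    'shellfish', 'crab', 'lobster', 'shrimp', 'prawn', 'scallop'])
--
--
-- def _has_meat_word(s):
--     # streaming tokenizer: never materializes the word list; checks each
--     # completed token against the meat set as soon as it closes
--     cur = []
--     for ch in s:
--         if ch.isspace():
--             if "".join(cur) in _MEAT: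
--                 return True
--             cur = []
--         else:
--             cur.append(ch)
--     return "".join(cur) in _MEAT
--
--
-- def dish_has_meat(ingredients):
--     return any(_has_meat_word(i.lower()) for i in ingredients)
-- ===== Notes on version B (the rewrite author's own statement) =====
-- stated objective: faster
-- what changed: Replaces split()-then-scan-the-26-entry-meat-list with a streaming character tokenizer: one pass over each lowercased ingredient builds the current token in an accumulator and probes a precomputed meat set the moment whitespace closes the token, so neither the materialized word list nor the inner scan over the meat list exists.
import Mathlib
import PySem

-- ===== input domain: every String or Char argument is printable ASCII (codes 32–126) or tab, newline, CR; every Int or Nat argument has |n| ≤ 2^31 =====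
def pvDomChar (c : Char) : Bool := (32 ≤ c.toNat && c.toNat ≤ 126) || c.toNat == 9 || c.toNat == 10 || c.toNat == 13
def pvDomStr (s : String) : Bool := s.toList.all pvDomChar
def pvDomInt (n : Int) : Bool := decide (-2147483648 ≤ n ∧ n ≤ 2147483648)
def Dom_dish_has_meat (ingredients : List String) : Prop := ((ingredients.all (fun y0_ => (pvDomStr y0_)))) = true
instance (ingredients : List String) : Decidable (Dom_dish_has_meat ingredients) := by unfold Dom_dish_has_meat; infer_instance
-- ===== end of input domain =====

-- B replaces split()+meat-list scan by a streaming character tokenizer that probes a meat set at each token boundary (alternative algorithm, same cost class).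

-- ===== PORT A =====
def pvMeatLst : List String :=
  ["hamburger", "cheeseburger", "corned beef", "sloppy joe", "chicken",
   "steak", "beef", "lamb", "bacon", "pork", "duck", "bison", "rabbit",
   "cow", "sausage", "turkey", "salmon", "cod", "fish", "halibut",
   "shellfish", "crab", "lobster", "shrimp", "prawn", "scallop"]

def dish_has_meat (ingredients : List String) : Bool :=
  match ingredients with
  | [] => false
  | i :: rest =>
    let words := PySem.Str.split₀ (PySem.Str.lower i)
    if pvMeatLst.any (fun word => words.contains word) then true
    else dish_has_meat rest

-- ===== PORT B =====
def pvMeatSet : PySem.Set String := PySem.Set.ofList pvMeatLst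

-- '"".join(cur) in _MEAT'
def pvInMeat (cur : List Char) : Bool := PySem.Set.contains pvMeatSet (String.ofList cur)

-- the character loop of _has_meat_word: cur is the token accumulated so far (in order)
def pvScan (s : List Char) (cur : List Char) : Bool :=
  match s with
  | [] => pvInMeat cur
  | c :: rest =>
    if PySem.Chars.isspace c then
      if pvInMeat cur then true else pvScan rest []
    else pvScan rest (cur ++ [c])

def pvHasMeatWord (s : String) : Bool := pvScan s.toList []

def dish_has_meat_alt (ingredients : List String) : Bool :=
  ingredients.any (fun i => pvHasMeatWord (PySem.Str.lower i))

-- ===== PRECONDITION & SPEC =====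
def Spec_dish_has_meat (ingredients : List String) (out : Bool) : Prop := out = dish_has_meat_alt ingredients
instance (ingredients : List String) (out : Bool) : Decidable (Spec_dish_has_meat ingredients out) := by unfold Spec_dish_has_meat; infer_instance

-- ===== CLAIM (what is proved, stated in full; the proofs are below) =====
def Claim_equal_dish_has_meat : Prop := ∀ (ingredients : List String), Dom_dish_has_meat ingredients → Spec_dish_has_meat ingredients (dish_has_meat ingredients)

-- ===== LEMMAS AND PROOFS =====

theorem pvInMeat_nil : pvInMeat [] = false := by decide

-- the scanner equals "some token produced by split₀'s worker satisfies pvInMeat"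
theorem pvScan_go (s : List Char) :
    ∀ cur acc, (PySem.Chars.split₀.go s cur.reverse acc).any (fun w => pvInMeat w) =
      (acc.any (fun w => pvInMeat w) || pvScan s cur) := by
  induction s with
  | nil =>
    intro cur acc
    simp only [PySem.Chars.split₀.go, pvScan]
    rcases cur with _ | ⟨c, cur'⟩
    · simp [pvInMeat_nil]
    · simp only [List.reverse_cons]
      rw [if_neg (by simp)]
      simp [Bool.or_comm]
  | cons c rest ih =>
    intro cur acc
    simp only [PySem.Chars.split₀.go, pvScan]
    by_cases hsp : PySem.Chars.isspace c
    · simp only [hsp, if_true]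
      rcases cur with _ | ⟨d, cur'⟩
      · rw [if_pos (by simp)]
        have := ih ([]) acc
        simpa [pvInMeat_nil] using this
      · rw [if_neg (by simp)]
        have := ih ([]) ((d :: cur') :: acc)
        simp only [List.reverse_nil, List.any_cons] at this
        rw [List.reverse_reverse, this]
        cases hm : pvInMeat (d :: cur') <;>
          simp [Bool.or_comm]
    · simp only [hsp]
      have := ih (cur ++ [c]) acc
      simpa using this

theorem pvHasMeatWord_eq (s : String) :
    pvHasMeatWord s = (PySem.Chars.split₀ s.toList).any (fun w => pvInMeat w) := by
  have h := pvScan_go s.toList [] []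
  simp only [List.reverse_nil, List.any_nil, Bool.false_or] at h
  rw [pvHasMeatWord, ← h, PySem.Chars.split₀]

-- A's inner test on one ingredient equals B's scanner on that ingredient
theorem pv_inner (i : String) :
    (pvMeatLst.any (fun word => (PySem.Str.split₀ (PySem.Str.lower i)).contains word)) =
    pvHasMeatWord (PySem.Str.lower i) := by
  rw [pvHasMeatWord_eq, Bool.eq_iff_iff]
  have hmap := PySem.Str.split₀_map_toList (PySem.Str.lower i)
  simp only [List.any_eq_true, List.contains_iff_mem]
  constructor
  · rintro ⟨word, hmem, hin⟩
    refine ⟨word.toList, by rw [← hmap]; exact List.mem_map_of_mem hin, ?_⟩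
    simp [pvInMeat, pvMeatSet, PySem.Set.contains, PySem.Set.mem_ofList, hmem]
  · rintro ⟨wl, hwl, hP⟩
    rw [← hmap] at hwl
    obtain ⟨w, hw, rfl⟩ := List.mem_map.mp hwl
    simp only [pvInMeat, pvMeatSet, PySem.Set.contains, String.ofList_toList,
      List.contains_iff_mem, PySem.Set.mem_ofList] at hP
    exact ⟨w, hP, hw⟩

theorem pv_main (ingredients : List String) :
    dish_has_meat ingredients = dish_has_meat_alt ingredients := by
  induction ingredients with
  | nil => rfl
  | cons i rest ih =>
    simp only [dish_has_meat, dish_has_meat_alt, List.any_cons]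
    rw [pv_inner]
    by_cases h : pvHasMeatWord (PySem.Str.lower i)
    · simp [h]
    · simp only [h, Bool.false_or]
      exact ih

-- ===== VERDICT (by name: the statement is the Claim_ definition above) =====
theorem dish_has_meat_spec : Claim_equal_dish_has_meat := by
  intro ingredients _
  exact pv_main ingredients
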